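-- pv_equiv track=rewrite | github.com/piotrhelm/NESTFUL | data_v2/executable_functions/py_code_file_1894.py | find_string_with_repeated_characters
-- ===== SOURCE A (Python) =====
-- from typing import List
--
-- def find_string_with_repeated_characters(arr: List[str]) -> str:
--
--     """Finds the first (lexicographically) string that has at least one character that appears at least twice.
--
--
--
--     Args:
--
--         arr: A list of strings.
--
--
--
--     Returns:
--
--         The first (lexicographically) string that has at least one character that appears at least twice.
--
--         If there is no such string, return an empty string.
--
--     """
--
--     for s in arr:
--
--         seen = set()
--
--         for c in s:
--
--             if c in seen:
--
--                 return s
--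
--             seen.add(c)
--
--     return ""
-- ===== SOURCE B (Python) =====
-- from typing import List
--
-- def find_string_with_repeated_characters(arr: List[str]) -> str:
--     for s in arr:
--         t = sorted(s)
--         if any(a == b for a, b in zip(t, t[1:])):
--             return s
--     return ""
-- ===== Notes on version B (the rewrite author's own statement) =====
-- stated objective: alternative
-- what changed: A's growing `seen` set with per-character membership test and early return is replaced by a sort-based algorithm: B sorts each string's characters and detects a duplicate as an equal adjacent pair (zip of the sorted list with its tail); no set is maintained.
import Mathlib
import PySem

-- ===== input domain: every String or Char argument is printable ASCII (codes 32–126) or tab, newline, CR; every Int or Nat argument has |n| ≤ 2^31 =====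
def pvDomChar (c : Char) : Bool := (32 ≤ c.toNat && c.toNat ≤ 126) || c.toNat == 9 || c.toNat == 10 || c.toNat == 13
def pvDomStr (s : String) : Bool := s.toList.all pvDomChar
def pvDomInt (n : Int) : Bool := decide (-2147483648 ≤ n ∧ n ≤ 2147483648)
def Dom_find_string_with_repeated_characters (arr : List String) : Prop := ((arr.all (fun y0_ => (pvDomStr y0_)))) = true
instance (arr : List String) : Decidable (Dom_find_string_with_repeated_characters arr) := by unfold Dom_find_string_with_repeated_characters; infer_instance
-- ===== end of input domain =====

-- B replaces A's seen-set scan by a sort-based algorithm: sort the characters, a duplicate is an equal adjacent pair.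

-- ===== PORT A =====
-- inner loop of A: 'seen = set(); for c in s: if c in seen: return s; seen.add(c)' — returns true iff the return fires
def pvInnerA : List Char → PySem.Set Char → Bool
  | [], _ => false
  | c :: cs, seen =>
      if PySem.Set.contains seen c then true
      else pvInnerA cs (PySem.Set.add seen c)

def find_string_with_repeated_characters : List String → String
  | [] => ""
  | s :: rest =>
      if pvInnerA s.toList PySem.Set.empty then s
      else find_string_with_repeated_characters rest

-- ===== PORT B =====
-- 't = sorted(s); any(a == b for a, b in zip(t, t[1:]))'
def pvHasAdjDup (s : String) : Bool :=
  let t := PySem.List.sorted s.toList (fun c => c) false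
  (t.zip t.tail).any (fun p => p.1 == p.2)

def find_string_with_repeated_characters_alt : List String → String
  | [] => ""
  | s :: rest =>
      if pvHasAdjDup s then s
      else find_string_with_repeated_characters_alt rest

-- ===== PRECONDITION & SPEC =====
def Spec_find_string_with_repeated_characters (arr : List String) (out : String) : Prop := out = find_string_with_repeated_characters_alt arr
instance (arr : List String) (out : String) : Decidable (Spec_find_string_with_repeated_characters arr out) := by unfold Spec_find_string_with_repeated_characters; infer_instance

-- ===== CLAIM =====
def Claim_equal_find_string_with_repeated_characters : Prop := ∀ (arr : List String), Dom_find_string_with_repeated_characters arr → Spec_find_string_with_repeated_characters arr (find_string_with_repeated_characters arr)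

-- ===== LEMMAS AND PROOFS =====

-- A's inner loop does NOT fire iff s has no duplicates and no char already in `seen`
theorem pvInnerA_eq_false_iff (cs : List Char) (seen : PySem.Set Char) :
    pvInnerA cs seen = false ↔ (cs.Nodup ∧ ∀ c ∈ cs, c ∉ seen) := by
  induction cs generalizing seen with
  | nil => simp [pvInnerA]
  | cons c cs ih =>
      by_cases h : PySem.Set.contains seen c = true
      · have hc : c ∈ seen := (PySem.Set.contains_iff seen c).mp h
        have ht : pvInnerA (c :: cs) seen = true := by
          simp [pvInnerA]
          exact Or.inl hc
        rw [ht]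
        constructor
        · intro hf; exact absurd hf (by decide)
        · rintro ⟨_, hall⟩
          exact ((hall c (by simp)) hc).elim
      · have hc : c ∉ seen := fun hm => h ((PySem.Set.contains_iff seen c).mpr hm)
        have hstep : pvInnerA (c :: cs) seen = pvInnerA cs (PySem.Set.add seen c) := by
          simp [pvInnerA]
          intro hm
          exact (hc hm).elim
        rw [hstep, ih, List.nodup_cons]
        constructor
        · rintro ⟨hnd, hall⟩
          refine ⟨⟨fun hmem => hall c hmem ((PySem.Set.mem_add seen c c).mpr (Or.inr rfl)), hnd⟩,
            fun x hx => ?_⟩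
          rcases List.mem_cons.mp hx with rfl | hx'
          · exact hc
          · exact fun hxs => hall x hx' ((PySem.Set.mem_add seen c x).mpr (Or.inl hxs))
        · rintro ⟨⟨hcn, hnd⟩, hall⟩
          refine ⟨hnd, fun x hx hxa => ?_⟩
          rcases (PySem.Set.mem_add seen c x).mp hxa with hxs | rfl
          · exact hall x (List.mem_cons_of_mem c hx) hxs
          · exact hcn hx

-- on a ≤-sorted list, no equal adjacent pair ↔ no duplicates
theorem adjDup_false_iff (t : List Char) (h : t.Pairwise (· ≤ ·)) :
    ((t.zip t.tail).any (fun p => p.1 == p.2)) = false ↔ t.Nodup := by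
  induction t with
  | nil => simp
  | cons a r ih =>
      cases r with
      | nil => simp
      | cons b r' =>
          have hpw : (b :: r').Pairwise (· ≤ ·) := h.tail
          have hab : a ≤ b := List.rel_of_pairwise_cons h (by simp)
          have har : ∀ x ∈ b :: r', a ≤ x := fun x hx => List.rel_of_pairwise_cons h hx
          have hbr : ∀ x ∈ r', b ≤ x := fun x hx => List.rel_of_pairwise_cons hpw hx
          have hz : ((a :: b :: r').zip (a :: b :: r').tail) =
              (a, b) :: ((b :: r').zip (b :: r').tail) := rfl
          rw [hz]
          simp only [List.any_cons, Bool.or_eq_false_iff, ih hpw, beq_eq_false_iff_ne,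
            List.nodup_cons]
          constructor
          · rintro ⟨hne, hnd⟩
            refine ⟨?_, hnd⟩
            intro hmem
            rcases List.mem_cons.mp hmem with rfl | hmem'
            · exact hne rfl
            · have hba : b ≤ a := hbr a hmem'
              exact hne (le_antisymm hab hba)
          · rintro ⟨hna, ⟨hnb, hnd⟩⟩
            exact ⟨fun he => hna (he ▸ List.mem_cons_self), ⟨hnb, hnd⟩⟩

theorem hasAdjDup_eq (s : String) :
    pvHasAdjDup s = !decide s.toList.Nodup := by
  show ((PySem.List.sorted s.toList (fun c => c) false).zip
      (PySem.List.sorted s.toList (fun c => c) false).tail).any (fun p => p.1 == p.2) =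
    !decide s.toList.Nodup
  have hpw := PySem.List.sorted_pairwise s.toList (fun c => c)
  have hperm := PySem.List.sorted_perm s.toList (fun c => c) false
  have hiff := adjDup_false_iff (PySem.List.sorted s.toList (fun c => c) false) hpw
  have hnd : (PySem.List.sorted s.toList (fun c => c) false).Nodup ↔ s.toList.Nodup :=
    hperm.nodup_iff
  by_cases h : s.toList.Nodup
  · rw [hiff.mpr (hnd.mpr h)]
    simp [h]
  · have hne : ((PySem.List.sorted s.toList (fun c => c) false).zip
        (PySem.List.sorted s.toList (fun c => c) false).tail).any (fun p => p.1 == p.2) = true := by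
      rcases Bool.eq_false_or_eq_true (((PySem.List.sorted s.toList (fun c => c) false).zip
        (PySem.List.sorted s.toList (fun c => c) false).tail).any (fun p => p.1 == p.2)) with hb | hb
      · exact hb
      · exact absurd (hnd.mp (hiff.mp hb)) h
    rw [hne]
    simp [h]

-- the two per-string tests agree
theorem cond_eq (s : String) :
    pvInnerA s.toList PySem.Set.empty = pvHasAdjDup s := by
  rw [hasAdjDup_eq]
  by_cases h : s.toList.Nodup
  · have hf : pvInnerA s.toList PySem.Set.empty = false :=
      (pvInnerA_eq_false_iff _ _).mpr ⟨h, by simp [PySem.Set.empty]⟩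
    rw [hf]
    simp [h]
  · have ht : pvInnerA s.toList PySem.Set.empty = true := by
      rcases Bool.eq_false_or_eq_true (pvInnerA s.toList PySem.Set.empty) with hb | hb
      · exact hb
      · exact absurd ((pvInnerA_eq_false_iff _ _).mp hb).1 h
    rw [ht]
    simp [h]

theorem main_eq (arr : List String) :
    find_string_with_repeated_characters arr = find_string_with_repeated_characters_alt arr := by
  induction arr with
  | nil => rfl
  | cons s rest ih =>
      unfold find_string_with_repeated_characters find_string_with_repeated_characters_alt
      rw [cond_eq s, ih]

-- ===== VERDICT =====
theorem find_string_with_repeated_characters_spec : Claim_equal_find_string_with_repeated_characters := by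
  intro arr _
  exact main_eq arr
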